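-- pv_equiv track=rewrite | github.com/utahnlp/layer_augmentation_qa | squad_extraction.py | get_gold
-- ===== SOURCE A (Python) =====
-- def get_gold(answer_spans):
-- 	cnt = {}
-- 	for span in answer_spans:
-- 		if span in cnt:
-- 			cnt[span] = cnt[span] + 1
-- 		else:
-- 			cnt[span] = 1
-- 	sorted_keys = sorted(cnt.items(), key=lambda x: x[1], reverse=True)
-- 	maj_span = sorted_keys[0][0]
-- 	return (maj_span, answer_spans.index(maj_span))
-- ===== SOURCE B (Python) =====
-- def get_gold(answer_spans):
-- 	uniq = list(dict.fromkeys(answer_spans))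
-- 	maj_span = max(uniq, key=answer_spans.count)
-- 	return (maj_span, answer_spans.index(maj_span))
-- ===== Notes on version B (the rewrite author's own statement) =====
-- stated objective: idiomatic
-- what changed: B drops A's hand-built frequency dict and sort of the count table: it dedups with dict.fromkeys and picks the majority span with max(..., key=answer_spans.count), whose first-maximum rule matches A's stable reverse sort tie-break.
import Mathlib
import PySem

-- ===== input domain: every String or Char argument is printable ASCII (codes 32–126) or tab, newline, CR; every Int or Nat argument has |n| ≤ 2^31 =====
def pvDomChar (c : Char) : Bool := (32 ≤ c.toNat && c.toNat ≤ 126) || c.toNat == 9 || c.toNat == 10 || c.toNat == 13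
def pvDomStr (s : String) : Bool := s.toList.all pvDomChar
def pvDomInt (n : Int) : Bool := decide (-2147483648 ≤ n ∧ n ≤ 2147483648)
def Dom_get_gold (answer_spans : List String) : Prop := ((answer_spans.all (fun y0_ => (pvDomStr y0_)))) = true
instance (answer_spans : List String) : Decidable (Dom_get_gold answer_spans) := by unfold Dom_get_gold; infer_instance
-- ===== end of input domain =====

-- B replaces A's frequency dict + sort of the count table by dict.fromkeys dedup and max(key=list.count); equal on every non-empty input (both raise on []).


-- ===== PORT A =====
def get_gold (answer_spans : List String) : String × Int :=
  let cnt : PySem.Dict String Int := answer_spans.foldl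
    (fun d span =>
      if d.contains span then d.insert span (d.getD span 0 + 1)
      else d.insert span 1) PySem.Dict.empty
  let sorted_keys := PySem.List.sorted cnt.items (fun x => x.2) true
  match PySem.List.pyGet? sorted_keys (0 : Int) with
  | none => ("", 0)  -- sorted_keys[0] raises IndexError (empty input; excluded by Pre_)
  | some p =>
      let maj_span := p.1
      (maj_span, ((PySem.List.index? answer_spans maj_span).map Int.ofNat).getD 0)

-- ===== PORT B =====
def get_gold_alt (answer_spans : List String) : String × Int :=
  let uniq := PySem.List.dedup answer_spans
  match PySem.List.max? uniq (fun s => (PySem.List.count answer_spans s : Int)) with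
  | none => ("", 0)  -- max([]) raises ValueError (empty input; excluded by Pre_)
  | some maj_span =>
      (maj_span, ((PySem.List.index? answer_spans maj_span).map Int.ofNat).getD 0)

-- ===== PRECONDITION & SPEC =====
-- Pre_: A raises IndexError on the empty list (and B raises ValueError there); nothing else is excluded.
def Pre_get_gold (answer_spans : List String) : Prop := answer_spans ≠ []
instance (answer_spans : List String) : Decidable (Pre_get_gold answer_spans) := by unfold Pre_get_gold; infer_instance
def pvWitness_get_gold : List String := ["a", "b", "a"]
def Spec_get_gold (answer_spans : List String) (out : String × Int) : Prop := out = get_gold_alt answer_spans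
instance (answer_spans : List String) (out : String × Int) : Decidable (Spec_get_gold answer_spans out) := by unfold Spec_get_gold; infer_instance

-- ===== CLAIM (what is proved, stated in full; the proofs are below) =====
def Claim_equal_get_gold : Prop := ∀ (answer_spans : List String), Dom_get_gold answer_spans → Pre_get_gold answer_spans → Spec_get_gold answer_spans (get_gold answer_spans)

-- ===== LEMMAS AND PROOFS =====

-- A's counting loop is Counter(answer_spans).
theorem pv_cnt_eq_counter (xs : List String) :
    xs.foldl (fun (d : PySem.Dict String Int) span =>
      if d.contains span then d.insert span (d.getD span 0 + 1)
      else d.insert span 1) PySem.Dict.empty = PySem.Dict.counter xs := by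
  rw [← PySem.Dict.foldl_insert_getD_add_one_eq_counter]
  have hstep : ∀ (d : PySem.Dict String Int) (span : String),
      (if d.contains span then d.insert span (d.getD span 0 + 1) else d.insert span 1)
        = d.insert span (d.getD span 0 + 1) := by
    intro d span
    by_cases h : d.contains span = true
    · simp [h]
    · have hn : d.get? span = none := by
        rw [PySem.Dict.contains_eq_isSome_get?] at h
        exact Option.not_isSome_iff_eq_none.mp (by simpa using h)
      simp [h, PySem.Dict.getD, hn]
  simp only [hstep]

-- head of the stable reverse insertion sort = Python max (first maximal element).
theorem pv_head_insertBy {α κ : Type} [LinearOrder κ] (key : α → κ) (x : α) (acc : List α) :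
    (PySem.List.insertBy (fun a b => decide (key b < key a)) x acc).head? =
      match acc.head? with
      | none => some x
      | some m => if key m < key x then some x else some m := by
  cases acc with
  | nil => rfl
  | cons h t => simp [PySem.List.insertBy]; split_ifs <;> simp

theorem pv_head_foldl_insertBy {α κ : Type} [LinearOrder κ] (key : α → κ) (l acc : List α) :
    (l.foldl (fun acc x => PySem.List.insertBy (fun a b => decide (key b < key a)) x acc) acc).head? =
      l.foldl (fun acc x =>
        match acc with
        | none => some x
        | some m => if key m < key x then some x else some m) acc.head? := by
  induction l generalizing acc with
  | nil => rfl
  | cons x t ih => simp only [List.foldl_cons, ih, pv_head_insertBy]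

theorem pv_head_sorted_rev_eq_max? {α κ : Type} [LinearOrder κ] (xs : List α) (key : α → κ) :
    (PySem.List.sorted xs key true).head? = PySem.List.max? xs key := by
  simpa [PySem.List.sorted, PySem.List.max?] using pv_head_foldl_insertBy key xs []

-- max over a mapped list, with the key reading the image.
theorem pv_max?_map_aux {α β κ : Type} [LinearOrder κ] (f : α → β) (key : β → κ)
    (l : List α) (a : Option α) :
    l.foldl (fun acc x => match acc with
        | none => some (f x)
        | some m => if key m < key (f x) then some (f x) else some m) (a.map f) =
      (l.foldl (fun acc x => match acc with
        | none => some x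
        | some m => if key (f m) < key (f x) then some x else some m) a).map f := by
  induction l generalizing a with
  | nil => rfl
  | cons y s ihs =>
    cases a with
    | none => simpa using ihs (some y)
    | some m =>
      simp only [List.foldl_cons, Option.map_some]
      split_ifs
      · simpa using ihs (some y)
      · simpa using ihs (some m)

theorem pv_max?_map {α β κ : Type} [LinearOrder κ] (l : List α) (f : α → β) (key : β → κ) :
    PySem.List.max? (l.map f) key = (PySem.List.max? l (fun a => key (f a))).map f := by
  simp only [PySem.List.max?, List.foldl_map]
  simpa using pv_max?_map_aux f key l none

-- xs[0] on a list is its head.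
theorem pv_pyGet_zero {α : Type} (l : List α) : PySem.List.pyGet? l (0 : Int) = l.head? := by
  cases l <;> simp [PySem.List.pyGet?, PySem.List.pyIdx?]

-- ===== VERDICT (by name: the statement is the Claim_ definition above) =====
theorem get_gold_spec : Claim_equal_get_gold := by
  intro xs _ hne
  unfold Spec_get_gold get_gold get_gold_alt
  simp only [pv_cnt_eq_counter, PySem.Dict.items_counter]
  cases hmax : PySem.List.max? (PySem.Set.ofList xs) (fun a => ((xs.count a : Int))) with
  | none =>
    exfalso
    rw [PySem.List.max?_eq_none_iff] at hmax
    cases xs with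
    | nil => exact hne rfl
    | cons h t =>
      have hm : h ∈ PySem.Set.ofList (h :: t) := by
        rw [PySem.Set.mem_ofList]; exact List.mem_cons_self
      rw [hmax] at hm
      exact (List.not_mem_nil hm)
  | some m =>
    have h1 : (PySem.List.sorted ((PySem.Set.ofList xs).map (fun k => (k, (xs.count k : Int))))
        (fun p => p.2) true).head? = some (m, (xs.count m : Int)) := by
      rw [pv_head_sorted_rev_eq_max?, pv_max?_map, hmax]; rfl
    rw [pv_pyGet_zero, h1]
    have h2 : PySem.List.max? (PySem.List.dedup xs)
        (fun s => ((PySem.List.count xs s : Int))) = some m := by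
      simpa [PySem.List.count_eq] using hmax
    rw [h2]
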